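-- pv_equiv track=rewrite | github.com/shashanksp04/MetaMirage- | preload_pipeline/preload/transforms/record_to_text.py | record_to_text
-- ===== SOURCE A (Python) =====
-- from typing import Any, Dict, Optional
--
-- def record_to_text(record: Dict[str, Any], entity_type: Optional[str] = None) -> str:
--     lines = []
--     if entity_type:
--         lines.append(f"ENTITY_TYPE: {entity_type}")
--
--     # A few common "name" fields first
--     preferred_keys = [
--         "Scientific Name", "scientific_name", "ScientificName",
--         "Common Name", "common_name", "CommonName",
--         "Name", "name",
--         "Symbol", "symbol",
--         "ID", "id",
--     ]
--
--     used = set()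
--     for k in preferred_keys:
--         if k in record and record[k] not in (None, ""):
--             lines.append(f"{k}: {str(record[k]).strip()}")
--             used.add(k)
--
--     for k, v in record.items():
--         if k in used or v is None:
--             continue
--         s = str(v).strip()
--         if not s:
--             continue
--         lines.append(f"{k}: {s}")
--
--     return "\n".join(lines).strip()
-- ===== SOURCE B (Python) =====
-- def record_to_text(record, entity_type=None):
--     preferred_keys = [
--         "Scientific Name", "scientific_name", "ScientificName",
--         "Common Name", "common_name", "CommonName",
--         "Name", "name",
--         "Symbol", "symbol",
--         "ID", "id",
--     ]
--     rank = {k: i for i, k in enumerate(preferred_keys)}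
--     slots = [None] * len(preferred_keys)
--     others = []
--     for k, v in record.items():
--         i = rank.get(k)
--         if i is not None:
--             if v not in (None, ""):
--                 slots[i] = f"{k}: {str(v).strip()}"
--         else:
--             if v is None:
--                 continue
--             s = str(v).strip()
--             if s:
--                 others.append(f"{k}: {s}")
--     lines = []
--     if entity_type:
--         lines.append(f"ENTITY_TYPE: {entity_type}")
--     lines.extend(line for line in slots if line is not None)
--     lines.extend(others)
--     return "\n".join(lines).strip()
-- ===== Notes on version B (the rewrite author's own statement) =====
-- stated objective: alternative
-- what changed: Replaces A's preferred-key scan (one dict lookup per preferred key) plus a second full pass over the record with a single pass over record.items() driven by a precomputed rank index and a fixed slot array, assembled at the end.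
import Mathlib
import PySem

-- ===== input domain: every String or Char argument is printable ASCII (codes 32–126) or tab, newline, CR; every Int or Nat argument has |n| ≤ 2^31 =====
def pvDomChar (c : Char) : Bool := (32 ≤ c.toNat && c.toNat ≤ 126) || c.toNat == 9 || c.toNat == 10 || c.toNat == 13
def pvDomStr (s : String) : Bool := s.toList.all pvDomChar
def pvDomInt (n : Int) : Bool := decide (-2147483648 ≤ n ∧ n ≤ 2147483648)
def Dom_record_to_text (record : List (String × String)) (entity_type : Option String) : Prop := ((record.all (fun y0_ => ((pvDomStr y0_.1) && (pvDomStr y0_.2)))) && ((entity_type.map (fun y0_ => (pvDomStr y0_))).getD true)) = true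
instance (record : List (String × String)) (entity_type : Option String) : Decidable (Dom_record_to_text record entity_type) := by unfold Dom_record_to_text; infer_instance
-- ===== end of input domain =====

-- B replaces A's preferred-key probing pass plus second full record scan by ONE pass over the
-- record driven by a precomputed rank index and a fixed slot array (alternative decomposition).
-- Values are strings here, so A's `v is None` / `not in (None, "")` checks reduce to `v ≠ ""`.

-- ===== PORT A =====
-- the preferred_keys literal (identical in Source A and Source B; shared by both ports)
def pvPrefKeys : List String :=
  ["Scientific Name", "scientific_name", "ScientificName",
   "Common Name", "common_name", "CommonName",
   "Name", "name",
   "Symbol", "symbol",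
   "ID", "id"]

def record_to_text (record : List (String × String)) (entity_type : Option String) : String :=
  let lines : List String :=
    match entity_type with
    | some e => if e ≠ "" then ["ENTITY_TYPE: " ++ e] else []   -- `if entity_type:` truthiness
    | none => []
  -- first loop: over preferred_keys, `k in record and record[k] not in (None, "")`
  let st := pvPrefKeys.foldl (fun (st : List String × PySem.Set String) k =>
      match PySem.Dict.get? (PySem.Dict.mk record) k with
      | some v => if v ≠ "" then (st.1 ++ [k ++ ": " ++ PySem.Str.strip v], PySem.Set.add st.2 k) else st
      | none => st) (lines, PySem.Set.empty)
  -- second loop: over record.items(); `v is None` can never hold for a String value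
  let lines := record.foldl (fun (acc : List String) kv =>
      if PySem.Set.contains st.2 kv.1 then acc
      else
        let s := PySem.Str.strip kv.2
        if s = "" then acc else acc ++ [kv.1 ++ ": " ++ s]) st.1
  PySem.Str.strip (PySem.Str.join "\n" lines)

-- ===== PORT B =====
-- rank = {k: i for i, k in enumerate(preferred_keys)}
def pvRank : PySem.Dict String Int :=
  (PySem.List.enumerate pvPrefKeys).foldl (fun d p => PySem.Dict.insert d p.2 p.1) PySem.Dict.empty

def record_to_text_alt (record : List (String × String)) (entity_type : Option String) : String :=
  let st := record.foldl (fun (st : List (Option String) × List String) kv =>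
      match PySem.Dict.get? pvRank kv.1 with
      | some i =>
        if kv.2 ≠ "" then (PySem.List.pySetD st.1 i (some (kv.1 ++ ": " ++ PySem.Str.strip kv.2)), st.2)
        else st
      | none =>
        let s := PySem.Str.strip kv.2
        if s = "" then st else (st.1, st.2 ++ [kv.1 ++ ": " ++ s]))
    (List.replicate pvPrefKeys.length none, [])
  let lines : List String :=
    (match entity_type with
     | some e => if e ≠ "" then ["ENTITY_TYPE: " ++ e] else []
     | none => []) ++ st.1.filterMap id ++ st.2
  PySem.Str.strip (PySem.Str.join "\n" lines)

-- ===== PRECONDITION & SPEC =====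
-- Pre_ excludes association lists with duplicate keys: a Python dict cannot hold them, and the
-- list-model's first-match lookup / last-write behaviour there is accidental.
def Pre_record_to_text (record : List (String × String)) (entity_type : Option String) : Prop :=
  (record.map Prod.fst).Nodup
instance (record : List (String × String)) (entity_type : Option String) : Decidable (Pre_record_to_text record entity_type) := by unfold Pre_record_to_text; infer_instance

def pvWitness_record_to_text : (List (String × String)) × Option String :=
  ([("name", "x"), ("habitat", " y ")], some "plant")

def Spec_record_to_text (record : List (String × String)) (entity_type : Option String) (out : String) : Prop := out = record_to_text_alt record entity_type
instance (record : List (String × String)) (entity_type : Option String) (out : String) : Decidable (Spec_record_to_text record entity_type out) := by unfold Spec_record_to_text; infer_instance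

-- ===== CLAIM (what is proved, stated in full; the proofs are below) =====
def Claim_equal_record_to_text : Prop := ∀ (record : List (String × String)) (entity_type : Option String), Dom_record_to_text record entity_type → Pre_record_to_text record entity_type → Spec_record_to_text record entity_type (record_to_text record entity_type)

-- ===== LEMMAS AND PROOFS =====

-- A's emitted line for key k with raw value v
def pvLine (k v : String) : String := k ++ ": " ++ PySem.Str.strip v

-- result of A's preferred probe for a single key
def pvProbe (record : List (String × String)) (k : String) : Option String :=
  match PySem.Dict.get? (PySem.Dict.mk record) k with
  | some v => if v ≠ "" then some (pvLine k v) else none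
  | none => none

-- whether key k passes A's preferred filter
def pvPass (record : List (String × String)) (k : String) : Bool :=
  match PySem.Dict.get? (PySem.Dict.mk record) k with
  | some v => v ≠ ""
  | none => false

-- B's "others" emitter
def pvFB (kv : String × String) : Option String :=
  match PySem.Dict.get? pvRank kv.1 with
  | some _ => none
  | none =>
    let s := PySem.Str.strip kv.2
    if s = "" then none else some (kv.1 ++ ": " ++ s)

-- B's slot-updating step, isolated
def pvStepSlot (slots : List (Option String)) (kv : String × String) : List (Option String) :=
  match PySem.Dict.get? pvRank kv.1 with
  | some i =>
    if kv.2 ≠ "" then PySem.List.pySetD slots i (some (kv.1 ++ ": " ++ PySem.Str.strip kv.2)) else slots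
  | none => slots

-- A's "others" emitter, parametrised by the used-set
def pvFOther (used : PySem.Set String) (kv : String × String) : Option String :=
  if PySem.Set.contains used kv.1 then none
  else
    let s := PySem.Str.strip kv.2
    if s = "" then none else some (kv.1 ++ ": " ++ s)

lemma rank_get (k : String) :
    PySem.Dict.get? pvRank k = Option.map Int.ofNat (List.idxOf? k pvPrefKeys) := by
  by_cases h1 : k = "Scientific Name"; · subst h1; decide
  by_cases h2 : k = "scientific_name"; · subst h2; decide
  by_cases h3 : k = "ScientificName"; · subst h3; decide
  by_cases h4 : k = "Common Name"; · subst h4; decide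
  by_cases h5 : k = "common_name"; · subst h5; decide
  by_cases h6 : k = "CommonName"; · subst h6; decide
  by_cases h7 : k = "Name"; · subst h7; decide
  by_cases h8 : k = "name"; · subst h8; decide
  by_cases h9 : k = "Symbol"; · subst h9; decide
  by_cases h10 : k = "symbol"; · subst h10; decide
  by_cases h11 : k = "ID"; · subst h11; decide
  by_cases h12 : k = "id"; · subst h12; decide
  simp only [pvRank, pvPrefKeys, PySem.List.enumerate, List.foldl,
    PySem.Dict.get?_insert, PySem.Dict.get?_empty, List.idxOf?, List.findIdx?, List.findIdx?.go,
    beq_iff_eq, if_neg h1, if_neg h2, if_neg h3, if_neg h4, if_neg h5, if_neg h6,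
    if_neg h7, if_neg h8, if_neg h9, if_neg h10, if_neg h11, if_neg h12,
    if_neg (Ne.symm h1), if_neg (Ne.symm h2), if_neg (Ne.symm h3), if_neg (Ne.symm h4),
    if_neg (Ne.symm h5), if_neg (Ne.symm h6), if_neg (Ne.symm h7), if_neg (Ne.symm h8),
    if_neg (Ne.symm h9), if_neg (Ne.symm h10), if_neg (Ne.symm h11), if_neg (Ne.symm h12)]
  rfl

lemma rank_get_none {k : String} (h : k ∉ pvPrefKeys) : PySem.Dict.get? pvRank k = none := by
  rw [rank_get]
  simp [List.idxOf?_eq_none_iff.mpr h]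

lemma rank_get_some {k : String} {i : Int} (h : PySem.Dict.get? pvRank k = some i) :
    0 ≤ i ∧ ∃ hn : i.toNat < pvPrefKeys.length, pvPrefKeys[i.toNat] = k := by
  rw [rank_get] at h
  rcases hm : List.idxOf? k pvPrefKeys with _ | n
  · exact absurd h (by simp [hm])
  · simp only [hm, Option.map_some, Option.some.injEq] at h
    obtain ⟨hn, hk, -⟩ := List.idxOf?_eq_some_iff.mp hm
    obtain rfl : i = Int.ofNat n := h.symm
    exact ⟨Int.natCast_nonneg n, by simpa [Int.ofNat_eq_natCast] using hn,
      by simpa [Int.ofNat_eq_natCast] using hk⟩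

lemma prefA_fold (pref : List String) (record : List (String × String))
    (lines : List String) (used : PySem.Set String) :
    pref.foldl (fun (st : List String × PySem.Set String) k =>
      match PySem.Dict.get? (PySem.Dict.mk record) k with
      | some v => if v ≠ "" then (st.1 ++ [k ++ ": " ++ PySem.Str.strip v], PySem.Set.add st.2 k) else st
      | none => st) (lines, used)
    = (lines ++ pref.filterMap (pvProbe record),
       pref.foldl (fun u k => if pvPass record k then PySem.Set.add u k else u) used) := by
  induction pref generalizing lines used with
  | nil => simp
  | cons k pref ih =>
    simp only [List.foldl_cons, List.filterMap_cons]
    rcases hg : PySem.Dict.get? (PySem.Dict.mk record) k with _ | v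
    · have h1 : pvProbe record k = none := by simp [pvProbe, hg]
      have h2 : pvPass record k = false := by simp [pvPass, hg]
      simp only [hg, h1, h2, Bool.false_eq_true, if_false]
      exact ih _ _
    · by_cases hv : v = ""
      · have h1 : pvProbe record k = none := by simp [pvProbe, hg, hv]
        have h2 : pvPass record k = false := by simp [pvPass, hg, hv]
        subst hv
        simp only [hg, h1, h2, ne_eq, not_true_eq_false, Bool.false_eq_true, if_false]
        exact ih _ _
      · have h1 : pvProbe record k = some (pvLine k v) := by simp [pvProbe, hg, hv]
        have h2 : pvPass record k = true := by simp [pvPass, hg, hv]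
        simp only [hg, h1, h2, ne_eq, hv, not_false_eq_true, if_true, ih, pvLine]
        simp

lemma usedFold_mem (pref : List String) (record : List (String × String))
    (used : PySem.Set String) (x : String) :
    x ∈ pref.foldl (fun u k => if pvPass record k then PySem.Set.add u k else u) used
      ↔ x ∈ used ∨ (x ∈ pref ∧ pvPass record x = true) := by
  induction pref generalizing used with
  | nil => simp
  | cons k pref ih =>
    simp only [List.foldl_cons, List.mem_cons]
    by_cases hp : pvPass record k
    · rw [if_pos hp, ih]
      simp only [PySem.Set.mem_add]
      constructor
      · rintro ((h | rfl) | h)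
        · exact Or.inl h
        · exact Or.inr ⟨Or.inl rfl, hp⟩
        · exact Or.inr ⟨Or.inr h.1, h.2⟩
      · rintro (h | ⟨(rfl | hm), hx⟩)
        · exact Or.inl (Or.inl h)
        · exact Or.inl (Or.inr rfl)
        · exact Or.inr ⟨hm, hx⟩
    · rw [if_neg hp, ih]
      constructor
      · rintro (h | h)
        · exact Or.inl h
        · exact Or.inr ⟨Or.inr h.1, h.2⟩
      · rintro (h | ⟨(rfl | hm), hx⟩)
        · exact Or.inl h
        · exact absurd hx hp
        · exact Or.inr ⟨hm, hx⟩

lemma secondA_fold (record : List (String × String)) (used : PySem.Set String)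
    (acc : List String) :
    record.foldl (fun (acc : List String) kv =>
      if PySem.Set.contains used kv.1 then acc
      else
        let s := PySem.Str.strip kv.2
        if s = "" then acc else acc ++ [kv.1 ++ ": " ++ s]) acc
    = acc ++ record.filterMap (pvFOther used) := by
  induction record generalizing acc with
  | nil => simp
  | cons kv record ih =>
    simp only [List.foldl_cons, List.filterMap_cons]
    by_cases hc : PySem.Set.contains used kv.1
    · have hpv : pvFOther used kv = none := by
        simp only [pvFOther, hc, if_true]
      simp only [hc, if_true, hpv]
      exact ih _
    · by_cases hs : PySem.Str.strip kv.2 = ""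
      · have hpv : pvFOther used kv = none := by
          simp only [pvFOther, hc, Bool.false_eq_true, if_false, hs, if_true]
        simp only [hc, Bool.false_eq_true, if_false, hs, if_true, hpv]
        exact ih _
      · have hpv : pvFOther used kv = some (kv.1 ++ ": " ++ PySem.Str.strip kv.2) := by
          simp only [pvFOther, hc, Bool.false_eq_true, if_false, hs, if_neg hs]
        simp only [hc, Bool.false_eq_true, if_false, hs, if_neg hs, hpv, ih]
        simp

lemma foldB_split (record : List (String × String)) (slots : List (Option String))
    (others : List String) :
    record.foldl (fun (st : List (Option String) × List String) kv =>
      match PySem.Dict.get? pvRank kv.1 with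
      | some i =>
        if kv.2 ≠ "" then (PySem.List.pySetD st.1 i (some (kv.1 ++ ": " ++ PySem.Str.strip kv.2)), st.2)
        else st
      | none =>
        let s := PySem.Str.strip kv.2
        if s = "" then st else (st.1, st.2 ++ [kv.1 ++ ": " ++ s])) (slots, others)
    = (record.foldl pvStepSlot slots, others ++ record.filterMap pvFB) := by
  induction record generalizing slots others with
  | nil => simp
  | cons kv record ih =>
    simp only [List.foldl_cons, List.filterMap_cons]
    rcases hg : PySem.Dict.get? pvRank kv.1 with _ | i
    · have hstep : ∀ slots, pvStepSlot slots kv = slots := by intro slots; simp [pvStepSlot, hg]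
      by_cases hs : PySem.Str.strip kv.2 = ""
      · have hpv : pvFB kv = none := by simp [pvFB, hg, hs]
        simp only [hg, hs, if_true, hpv, ih, hstep]
      · have hpv : pvFB kv = some (kv.1 ++ ": " ++ PySem.Str.strip kv.2) := by
          simp [pvFB, hg, hs]
        simp only [hg, hs, if_false, hpv, ih, hstep]
        simp
    · have hpv : pvFB kv = none := by simp [pvFB, hg]
      by_cases hv : kv.2 = ""
      · have hstep : ∀ slots, pvStepSlot slots kv = slots := by
          intro slots; simp [pvStepSlot, hg, hv]
        simp only [hg, hv, ne_eq, not_true_eq_false, Bool.false_eq_true, if_false, hpv, ih, hstep]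
      · have hstep : ∀ slots, pvStepSlot slots kv
            = PySem.List.pySetD slots i (some (kv.1 ++ ": " ++ PySem.Str.strip kv.2)) := by
          intro slots; simp [pvStepSlot, hg, hv]
        simp only [hg, ne_eq, hv, not_false_eq_true, if_true, hpv, ih, hstep]

lemma foldSlots_length (record : List (String × String)) (slots : List (Option String)) :
    (record.foldl pvStepSlot slots).length = slots.length := by
  induction record generalizing slots with
  | nil => rfl
  | cons kv record ih =>
    simp only [List.foldl_cons]
    rw [ih]
    simp only [pvStepSlot]
    rcases PySem.Dict.get? pvRank kv.1 with _ | i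
    · rfl
    · by_cases hv : kv.2 = "" <;> simp [hv, PySem.List.length_pySetD]

lemma pvPrefKeys_nodup : pvPrefKeys.Nodup := by decide

lemma rank_some_of_mem {k : String} (h : k ∈ pvPrefKeys) :
    ∃ i, PySem.Dict.get? pvRank k = some i := by
  rcases hi : List.idxOf? k pvPrefKeys with _ | n
  · exact absurd (List.idxOf?_eq_none_iff.mp hi) (by simpa using h)
  · exact ⟨Int.ofNat n, by rw [rank_get, hi]; rfl⟩

lemma probe_cons_of_ne {kv : String × String} {rest : List (String × String)} {key : String}
    (h : kv.1 ≠ key) : pvProbe (kv :: rest) key = pvProbe rest key := by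
  simp only [pvProbe]
  rw [show PySem.Dict.mk (kv :: rest) = PySem.Dict.mk ((kv.1, kv.2) :: rest) from rfl,
    PySem.Dict.get?_mk_cons]
  simp [h]

lemma probe_of_not_mem_keys {record : List (String × String)} {key : String}
    (h : key ∉ record.map Prod.fst) : pvProbe record key = none := by
  have : PySem.Dict.get? (PySem.Dict.mk record) key = none := by
    rw [PySem.Dict.get?_eq_none_iff_not_mem_keys]
    simpa [PySem.Dict.keys] using h
  simp [pvProbe, this]

lemma foldSlots_get :
    ∀ (record : List (String × String)), (record.map Prod.fst).Nodup →
    ∀ (slots : List (Option String)) (hs : slots.length = pvPrefKeys.length)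
      (n : Nat) (hn : n < pvPrefKeys.length),
    (record.foldl pvStepSlot slots)[n]? =
      some ((pvProbe record (pvPrefKeys[n])).or (slots[n]'(by omega))) := by
  intro record
  induction record with
  | nil =>
    intro _ slots hs n hn
    have hn' : n < slots.length := by omega
    rw [List.foldl_nil, List.getElem?_eq_getElem hn']
    have : pvProbe [] (pvPrefKeys[n]) = none := rfl
    rw [this, Option.none_or]
  | cons kv rest ih =>
    intro hnd slots hs n hn
    have hnd' : (rest.map Prod.fst).Nodup := (List.nodup_cons.mp (by simpa using hnd)).2
    have hknotin : kv.1 ∉ rest.map Prod.fst := (List.nodup_cons.mp (by simpa using hnd)).1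
    rw [List.foldl_cons]
    rcases hg : PySem.Dict.get? pvRank kv.1 with _ | i
    · -- kv.1 is not a preferred key: slot step is the identity
      have hkp : kv.1 ∉ pvPrefKeys := by
        intro hmem
        rcases rank_some_of_mem hmem with ⟨i, hi⟩
        rw [hg] at hi; cases hi
      have hstep : pvStepSlot slots kv = slots := by simp [pvStepSlot, hg]
      rw [hstep, ih hnd' slots hs n hn,
        probe_cons_of_ne (fun he => hkp (he ▸ pvPrefKeys.getElem_mem hn))]
    · obtain ⟨hi0, hlt, hkey⟩ := rank_get_some hg
      by_cases hv : kv.2 = ""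
      · have hstep : pvStepSlot slots kv = slots := by simp [pvStepSlot, hg, hv]
        rw [hstep, ih hnd' slots hs n hn]
        by_cases hkn : kv.1 = pvPrefKeys[n]
        · have h1 : pvProbe (kv :: rest) (pvPrefKeys[n]) = none := by
            simp only [pvProbe]
            rw [show PySem.Dict.mk (kv :: rest) = PySem.Dict.mk ((kv.1, kv.2) :: rest) from rfl,
              PySem.Dict.get?_mk_cons]
            simp [hkn, hv]
          rw [h1, probe_of_not_mem_keys (hkn ▸ hknotin)]
        · rw [probe_cons_of_ne hkn]
      · have hstep : pvStepSlot slots kv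
            = slots.set i.toNat (some (kv.1 ++ ": " ++ PySem.Str.strip kv.2)) := by
          simp [pvStepSlot, hg, hv, PySem.List.pySetD_of_nonneg _ _ hi0]
        rw [hstep, ih hnd' _ (by simp [hs]) n hn]
        by_cases hkn : kv.1 = pvPrefKeys[n]
        · have hin : i.toNat = n := by
            have := (pvPrefKeys_nodup.getElem_inj_iff (hi := hlt) (hj := hn)).mp
              (by rw [hkey, hkn])
            exact this
          have h2 : pvProbe (kv :: rest) (pvPrefKeys[n]) = some (kv.1 ++ ": " ++ PySem.Str.strip kv.2) := by
            simp only [pvProbe, pvLine]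
            rw [show PySem.Dict.mk (kv :: rest) = PySem.Dict.mk ((kv.1, kv.2) :: rest) from rfl,
              PySem.Dict.get?_mk_cons]
            simp [hkn, hv]
          rw [probe_of_not_mem_keys (hkn ▸ hknotin), h2, Option.none_or]
          congr 1
          rw [hin]
          exact List.getElem_set_self (by simp; omega)
        · have hne : i.toNat ≠ n := by
            intro he
            apply hkn
            simp only [he] at hkey
            exact hkey.symm
          rw [probe_cons_of_ne hkn]
          congr 2
          exact List.getElem_set_ne hne (by simp; omega)

lemma slots_final (record : List (String × String))
    (hnd : (record.map Prod.fst).Nodup) :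
    record.foldl pvStepSlot (List.replicate pvPrefKeys.length none)
      = pvPrefKeys.map (pvProbe record) := by
  apply List.ext_getElem?
  intro n
  by_cases hn : n < pvPrefKeys.length
  · rw [foldSlots_get record hnd _ (by simp) n hn]
    simp [hn]
  · rw [List.getElem?_eq_none, List.getElem?_eq_none]
    · simpa using hn
    · rw [foldSlots_length]; simpa using hn

lemma others_agree (record : List (String × String))
    (hnd : (record.map Prod.fst).Nodup) :
    record.filterMap (pvFOther (pvPrefKeys.foldl
      (fun u k => if pvPass record k then PySem.Set.add u k else u) PySem.Set.empty))
    = record.filterMap pvFB := by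
  apply List.filterMap_congr
  intro kv hm
  have hget : PySem.Dict.get? (PySem.Dict.mk record) kv.1 = some kv.2 :=
    PySem.Dict.get?_of_mem_items (PySem.Dict.mk record) (by simpa using hm) (by simpa using hnd)
  have hpass : pvPass record kv.1 = decide (kv.2 ≠ "") := by simp [pvPass, hget]
  have hmemiff : ∀ x, x ∈ (pvPrefKeys.foldl
      (fun u k => if pvPass record k then PySem.Set.add u k else u) PySem.Set.empty)
      ↔ (x ∈ pvPrefKeys ∧ pvPass record x = true) := by
    intro x
    rw [usedFold_mem]
    simp [PySem.Set.empty]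
  by_cases hk : kv.1 ∈ pvPrefKeys
  · obtain ⟨i, hri⟩ := rank_some_of_mem (by simpa using hk)
    have hfb : pvFB kv = none := by simp [pvFB, hri]
    rw [hfb]
    by_cases hv : kv.2 = ""
    · have hs0 : PySem.Str.strip kv.2 = "" := by rw [hv]; rfl
      simp [pvFOther, hs0]
    · have hmemF := (hmemiff kv.1).mpr ⟨hk, by simp [hpass, hv]⟩
      simp only [PySem.Set.empty] at hmemF
      simp [pvFOther, hmemF]
  · have hr : PySem.Dict.get? pvRank kv.1 = none :=
      rank_get_none (by simpa using hk)
    have hnm : kv.1 ∉ pvPrefKeys.foldl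
        (fun u k => if pvPass record k then PySem.Set.add u k else u) PySem.Set.empty :=
      fun hmem => hk ((hmemiff kv.1).mp hmem).1
    simp only [PySem.Set.empty] at hnm
    simp [pvFOther, pvFB, hr, hnm]

theorem record_to_text_spec : Claim_equal_record_to_text := by
  intro record entity_type _hdom hpre
  simp only [Spec_record_to_text, record_to_text, record_to_text_alt]
  rw [prefA_fold, foldB_split, secondA_fold]
  have hnd : (record.map Prod.fst).Nodup := hpre
  rw [slots_final record hnd, others_agree record hnd]
  simp only [List.filterMap_map, Function.comp]
  rfl
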